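-- pv_equiv track=rewrite | github.com/IntelPython/sdc | hpat/tests/tests_perf/test_perf_series.py | generate
-- ===== SOURCE A (Python) =====
-- def generate(input, maxlen):
--     result = []
--     i = 0
--     N = len(input)
--     while len(result) < maxlen[0]:
--         n = (i - i // 2) % N
--         result.extend(input[n])
--         i += 1
--     return result[:maxlen[0]]
-- ===== SOURCE B (Python) =====
-- def generate(input, maxlen):
--     # Closed-form: the produced stream is input[0] followed by the fixed cycle
--     # (input[1],input[1],...,input[N-1],input[N-1],input[0],input[0]) repeated;
--     # compute the repetition count arithmetically and slice once.
--     k = maxlen[0]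
--     if k <= 0:
--         return []
--     head = input[0]
--     if k <= len(head):
--         return head[:k]
--     N = len(input)
--     cycle = []
--     for j in list(range(1, N)) + [0]:
--         cycle += input[j] + input[j]
--     reps = -((k - len(head)) // -len(cycle))   # ceil division
--     return (head + cycle * reps)[:k]
-- ===== Notes on version B (the rewrite author's own statement) =====
-- stated objective: alternative
-- what changed: B replaces A's grow-until-long-enough loop (extend by the indexed chunk, re-test the length, then slice the overshoot) by a closed-form construction: it builds the stream's fixed period (each chunk twice, rotated) once, computes the number of repetitions needed by ceiling division, and slices once.
import Mathlib
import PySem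

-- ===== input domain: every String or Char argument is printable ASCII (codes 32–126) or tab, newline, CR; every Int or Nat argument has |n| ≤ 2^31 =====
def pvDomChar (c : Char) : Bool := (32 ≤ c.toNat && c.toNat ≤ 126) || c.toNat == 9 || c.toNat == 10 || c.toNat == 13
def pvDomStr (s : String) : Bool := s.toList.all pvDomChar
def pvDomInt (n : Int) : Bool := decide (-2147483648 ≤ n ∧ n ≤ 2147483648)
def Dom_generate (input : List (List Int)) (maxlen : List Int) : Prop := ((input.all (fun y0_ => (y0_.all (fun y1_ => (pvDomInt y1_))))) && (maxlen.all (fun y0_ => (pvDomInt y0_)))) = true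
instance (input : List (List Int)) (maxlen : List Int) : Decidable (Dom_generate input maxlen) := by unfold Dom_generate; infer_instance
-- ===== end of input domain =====

-- B replaces A's grow-until-long-enough loop by building the fixed periodic cycle once and
-- computing the repetition count arithmetically (ceiling division), then slicing once; same
-- return value on all inputs admitted by Pre_ (objective: alternative algorithm).

-- ===== PORT A =====
-- A's while-loop; `fuel` is only a totality guard: on inputs satisfying Pre_generate the loop
-- stops before the fuel runs out (proved below), so the `0 => acc` arm is never the result.
def generateLoop (input : List (List Int)) (k : Int) (fuel i : Nat) (acc : List Int) : List Int :=
  if (acc.length : Int) < k then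
    match fuel with
    | 0 => acc
    | fuel' + 1 =>
      -- n = (i - i // 2) % N ; result.extend(input[n]) ; i += 1
      -- (mod by N = 0 is Python's ZeroDivisionError, and an out-of-range index Python's
      -- IndexError; neither is reachable under Pre_generate, so .getD [] is never taken)
      let n := PySem.Int.mod ((i : Int) - PySem.Int.floordiv (i : Int) 2) (input.length : Int)
      generateLoop input k fuel' (i + 1) (acc ++ (PySem.List.pyGet? input n).getD [])
  else acc

def generate (input : List (List Int)) (maxlen : List Int) : List Int :=
  -- maxlen[0]: IndexError on [] is excluded by Pre_generate, so .getD 0 is never taken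
  let k := (PySem.List.pyGet? maxlen 0).getD 0
  PySem.List.slice (generateLoop input k (2 * input.length * k.toNat + 2) 0 []) none (some k)

-- ===== PORT B =====
def generate_alt (input : List (List Int)) (maxlen : List Int) : List Int :=
  let k := (PySem.List.pyGet? maxlen 0).getD 0        -- k = maxlen[0]
  if k ≤ 0 then []
  else
    let head := (PySem.List.pyGet? input 0).getD []   -- head = input[0]
    if k ≤ (head.length : Int) then PySem.List.slice head none (some k)
    else
      -- for j in list(range(1, N)) + [0]: cycle += input[j] + input[j]
      let cycle := (PySem.List.pyRange 1 (input.length : Int) 1 ++ [0]).foldl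
        (fun acc j => acc ++ ((PySem.List.pyGet? input j).getD [] ++ (PySem.List.pyGet? input j).getD [])) []
      -- reps = -((k - len(head)) // -len(cycle))   (ceiling division)
      let reps := -(PySem.Int.floordiv (k - (head.length : Int)) (-((cycle.length : Nat) : Int)))
      PySem.List.slice (head ++ PySem.List.pyRepeat cycle reps) none (some k)

-- ===== PRECONDITION & SPEC =====
-- Pre_ excludes exactly the inputs on which A does not return: maxlen = [] (IndexError), and
-- a positive maxlen[0] with no element to draw from (input = [] raises ZeroDivisionError;
-- nonempty input whose chunks are all empty makes A loop forever).
def Pre_generate (input : List (List Int)) (maxlen : List Int) : Prop :=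
  maxlen ≠ [] ∧ (0 < maxlen.headD 0 → input.flatten ≠ [])
instance (input : List (List Int)) (maxlen : List Int) : Decidable (Pre_generate input maxlen) := by
  unfold Pre_generate; infer_instance

def pvWitness_generate : List (List Int) × List Int := ([[1, 2], [], [3]], [7])

def Spec_generate (input : List (List Int)) (maxlen : List Int) (out : List Int) : Prop := out = generate_alt input maxlen
instance (input : List (List Int)) (maxlen : List Int) (out : List Int) : Decidable (Spec_generate input maxlen out) := by unfold Spec_generate; infer_instance

-- ===== CLAIM (what is proved, stated in full; the proofs are below) =====
def Claim_equal_generate : Prop := ∀ (input : List (List Int)) (maxlen : List Int), Dom_generate input maxlen → Pre_generate input maxlen → Spec_generate input maxlen (generate input maxlen)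

-- ===== LEMMAS AND PROOFS =====

-- chunk j = input[j]; idx t = (t - t//2) % N, the chunk index A picks at step t
def pvChunk (input : List (List Int)) (j : Nat) : List Int := input.getD j []
def pvIdx (N t : Nat) : Nat := (t - t / 2) % N
-- everything A's loop has appended after m iterations
def pvFlat (input : List (List Int)) (m : Nat) : List Int :=
  (List.range m).flatMap (fun t => pvChunk input (pvIdx input.length t))
-- the period of the stream after its first block: chunks 1,1,2,2,…,N-1,N-1,0,0
def pvCycle (input : List (List Int)) : List Int :=
  (List.range input.length).flatMap
    (fun j => pvChunk input ((j + 1) % input.length) ++ pvChunk input ((j + 1) % input.length))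

lemma pvFlat_add (input : List (List Int)) (a s : Nat) :
    pvFlat input (a + s)
      = pvFlat input a ++ (List.range s).flatMap (fun t => pvChunk input (pvIdx input.length (a + t))) := by
  unfold pvFlat
  rw [List.range_add, List.flatMap_append, List.flatMap_map]

lemma pvIdx_period (N t : Nat) : pvIdx N (t + 2 * N) = pvIdx N t := by
  unfold pvIdx
  have h : t + 2 * N - (t + 2 * N) / 2 = (t - t / 2) + N := by omega
  rw [h, Nat.add_mod_right]

lemma pvIdx_period_mul (N t m : Nat) : pvIdx N (t + 2 * N * m) = pvIdx N t := by
  induction m with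
  | zero => rfl
  | succ m ih =>
    have h : t + 2 * N * (m + 1) = (t + 2 * N * m) + 2 * N := by ring
    rw [h, pvIdx_period, ih]

lemma pvPair_flatMap (g : Nat → List Int) (n : Nat) :
    (List.range (2 * n)).flatMap g
      = (List.range n).flatMap (fun j => g (2 * j) ++ g (2 * j + 1)) := by
  induction n with
  | zero => rfl
  | succ n ih =>
    have h : 2 * (n + 1) = (2 * n + 1) + 1 := by ring
    rw [h, List.range_succ, List.range_succ, List.range_succ,
        List.flatMap_append, List.flatMap_append, List.flatMap_append, ih]
    simp [List.append_assoc]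

lemma pvBlock_eq_cycle (input : List (List Int)) :
    (List.range (2 * input.length)).flatMap (fun t => pvChunk input (pvIdx input.length (1 + t)))
      = pvCycle input := by
  rw [pvPair_flatMap]
  unfold pvCycle
  have h1 : ∀ j : Nat, pvIdx input.length (1 + 2 * j) = (j + 1) % input.length := by
    intro j; unfold pvIdx; congr 1; omega
  have h2 : ∀ j : Nat, pvIdx input.length (1 + (2 * j + 1)) = (j + 1) % input.length := by
    intro j; unfold pvIdx; congr 1; omega
  simp only [h1, h2]

lemma pvFlat_one (input : List (List Int)) : pvFlat input 1 = pvChunk input 0 := by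
  simp [pvFlat, pvIdx, List.range_succ]

lemma pvFlat_cycle (input : List (List Int)) (m : Nat) :
    pvFlat input (1 + 2 * input.length * m)
      = pvChunk input 0 ++ (List.replicate m (pvCycle input)).flatten := by
  induction m with
  | zero => simpa using pvFlat_one input
  | succ m ih =>
    have h : 1 + 2 * input.length * (m + 1) = (1 + 2 * input.length * m) + 2 * input.length := by ring
    rw [h, pvFlat_add, ih]
    have h2 : ∀ t : Nat, pvIdx input.length (1 + 2 * input.length * m + t)
        = pvIdx input.length (1 + t) := by
      intro t
      have harith : 1 + 2 * input.length * m + t = (1 + t) + 2 * input.length * m := by ring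
      rw [harith, pvIdx_period_mul]
    simp only [h2, pvBlock_eq_cycle]
    rw [List.replicate_succ', List.flatten_append]
    simp [List.append_assoc]

lemma pvFlat_prefix (input : List (List Int)) {a b : Nat} (h : a ≤ b) :
    pvFlat input a <+: pvFlat input b := by
  have hb : b = a + (b - a) := by omega
  rw [hb, pvFlat_add]
  exact List.prefix_append _ _

lemma pvTake_common {l1 l2 L : List Int} (k : Nat) (h1 : l1 <+: L) (h2 : l2 <+: L)
    (hk1 : k ≤ l1.length) (hk2 : k ≤ l2.length) : l1.take k = l2.take k := by
  rw [List.prefix_iff_eq_take.mp h1, List.prefix_iff_eq_take.mp h2,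
      List.take_take, List.take_take, Nat.min_eq_left hk1, Nat.min_eq_left hk2]

lemma pvMod_idx (N i : Nat) :
    PySem.Int.mod ((i : Int) - PySem.Int.floordiv (i : Int) 2) (N : Int) = ((pvIdx N i : Nat) : Int) := by
  have h1 : PySem.Int.floordiv (i : Int) 2 = ((i / 2 : Nat) : Int) := by
    exact_mod_cast PySem.Int.floordiv_natCast i 2
  have h2 : (i : Int) - ((i / 2 : Nat) : Int) = ((i - i / 2 : Nat) : Int) := by
    have := Nat.div_le_self i 2; push_cast; omega
  rw [h1, h2, PySem.Int.mod_natCast]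
  simp [pvIdx]

lemma pvCycle_ne_nil (input : List (List Int)) (h : input.flatten ≠ []) : pvCycle input ≠ [] := by
  intro hc
  apply h
  rw [List.flatten_eq_nil_iff]
  intro c hcmem
  obtain ⟨j0, hj0, rfl⟩ := List.mem_iff_getElem.mp hcmem
  have key : ∀ j ∈ List.range input.length,
      pvChunk input ((j + 1) % input.length) ++ pvChunk input ((j + 1) % input.length) = [] :=
    List.flatMap_eq_nil_iff.mp hc
  by_cases hz : j0 = 0
  · subst hz
    have hk := key (input.length - 1) (List.mem_range.mpr (by omega))
    have heq : (input.length - 1 + 1) % input.length = 0 := by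
      rw [Nat.sub_add_cancel (by omega), Nat.mod_self]
    rw [heq] at hk
    have hk2 := (List.append_eq_nil_iff.mp hk).1
    simpa [pvChunk, List.getD_eq_getElem?_getD, List.getElem?_eq_getElem hj0] using hk2
  · have hk := key (j0 - 1) (List.mem_range.mpr (by omega))
    have heq : (j0 - 1 + 1) % input.length = j0 := by
      rw [Nat.sub_add_cancel (by omega), Nat.mod_eq_of_lt hj0]
    rw [heq] at hk
    have hk2 := (List.append_eq_nil_iff.mp hk).1
    simpa [pvChunk, List.getD_eq_getElem?_getD, List.getElem?_eq_getElem hj0] using hk2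

lemma pvFlat_succ (input : List (List Int)) (i : Nat) :
    pvFlat input (i + 1) = pvFlat input i ++ pvChunk input (pvIdx input.length i) := by
  unfold pvFlat
  rw [List.range_succ, List.flatMap_append]
  simp

lemma pvLoop_reaches (input : List (List Int)) (k : Int) (hN : 0 < input.length) :
    ∀ (fuel i : Nat), k ≤ ((pvFlat input (i + fuel)).length : Int) →
      ∃ j, generateLoop input k fuel i (pvFlat input i) = pvFlat input j
            ∧ k ≤ ((pvFlat input j).length : Int) := by
  intro fuel
  induction fuel with
  | zero =>
    intro i h
    refine ⟨i, ?_, by simpa using h⟩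
    rw [generateLoop]
    have hnot : ¬ ((pvFlat input i).length : Int) < k := by simpa using h
    simp [hnot]
  | succ fuel ih =>
    intro i h
    by_cases hlt : ((pvFlat input i).length : Int) < k
    · rw [generateLoop]
      simp only [hlt, if_true]
      have hlt2 : pvIdx input.length i < input.length := by
        unfold pvIdx; exact Nat.mod_lt _ hN
      have hstep : (PySem.List.pyGet? input
          (PySem.Int.mod ((i : Int) - PySem.Int.floordiv (i : Int) 2) (input.length : Int))).getD []
          = pvChunk input (pvIdx input.length i) := by
        rw [pvMod_idx input.length i, PySem.List.pyGet?_natCast]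
        simp [pvChunk, List.getD_eq_getElem?_getD, List.getElem?_eq_getElem hlt2]
      rw [hstep, ← pvFlat_succ]
      apply ih
      have harith : i + 1 + fuel = i + (fuel + 1) := by ring
      rw [harith]; exact h
    · refine ⟨i, ?_, by omega⟩
      rw [generateLoop]
      simp [hlt]

lemma pvHead_eq (input : List (List Int)) :
    (PySem.List.pyGet? input (0 : Int)).getD [] = pvChunk input 0 := by
  rw [PySem.List.pyGet?_zero]
  simp [pvChunk, List.getD_eq_getElem?_getD]

lemma pvFoldCycle (input : List (List Int)) (hN : 0 < input.length) :
    (PySem.List.pyRange 1 (input.length : Int) 1 ++ [0]).foldl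
        (fun acc j => acc ++ ((PySem.List.pyGet? input j).getD [] ++ (PySem.List.pyGet? input j).getD [])) []
      = pvCycle input := by
  rw [PySem.List.foldl_append_eq_flatMap, List.flatMap_append, List.nil_append]
  rw [PySem.List.pyRange_one, List.flatMap_map]
  have hN1 : ((input.length : Int) - 1).toNat = input.length - 1 := by omega
  rw [hN1]
  have hg : ∀ t ∈ List.range (input.length - 1),
      ((PySem.List.pyGet? input ((1 : Int) + (t : Int))).getD []
        ++ (PySem.List.pyGet? input ((1 : Int) + (t : Int))).getD [])
      = pvChunk input ((t + 1) % input.length) ++ pvChunk input ((t + 1) % input.length) := by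
    intro t ht
    have htlt : t + 1 < input.length := by
      have := List.mem_range.mp ht; omega
    have hc : ((1 : Int) + (t : Int)) = ((t + 1 : Nat) : Int) := by push_cast; ring
    have hm : (t + 1) % input.length = t + 1 := Nat.mod_eq_of_lt htlt
    rw [hc, PySem.List.pyGet?_natCast, List.getElem?_eq_getElem htlt, hm]
    simp [pvChunk, List.getD_eq_getElem?_getD, List.getElem?_eq_getElem htlt]
  unfold pvCycle
  have hsplit : List.range input.length = List.range (input.length - 1) ++ [input.length - 1] := by
    conv_lhs => rw [show input.length = (input.length - 1) + 1 by omega]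
    rw [List.range_succ]
  rw [hsplit, List.flatMap_append]
  congr 1
  · rw [List.flatMap_def, List.flatMap_def, List.map_congr_left hg]
  · have hm0 : (input.length - 1 + 1) % input.length = 0 := by
      rw [Nat.sub_add_cancel (by omega), Nat.mod_self]
    simp [hm0, pvHead_eq input]

lemma pvRepLen (input : List (List Int)) (m : Nat) :
    ((List.replicate m (pvCycle input)).flatten).length = m * (pvCycle input).length := by
  simp [List.length_flatten, List.map_replicate, List.sum_replicate, smul_eq_mul]

-- ===== VERDICT (by name: the statement is the Claim_ definition above) =====
theorem generate_spec : Claim_equal_generate := by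
  intro input maxlen hdom hpre
  unfold Spec_generate
  obtain ⟨hml, hflat⟩ := hpre
  obtain ⟨k, ml, rfl⟩ : ∃ k ml, maxlen = k :: ml := by
    cases maxlen with
    | nil => exact absurd rfl hml
    | cons a l => exact ⟨a, l, rfl⟩
  have hk0 : (PySem.List.pyGet? (k :: ml) 0).getD 0 = k := by
    simp
  simp only [generate, generate_alt, hk0]
  by_cases hk : k ≤ 0
  · rw [generateLoop]
    simp [hk, PySem.List.slice]

  · have hkpos : 0 < k := by omega
    have hfl : input.flatten ≠ [] := hflat (by simpa using hkpos)
    have hN : 0 < input.length := by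
      rcases input with _ | ⟨c, cs⟩
      · simp at hfl
      · simp
    have hLpos : 0 < (pvCycle input).length :=
      List.length_pos_of_ne_nil (pvCycle_ne_nil input hfl)
    have hktk : ((k.toNat : Nat) : Int) = k := Int.toNat_of_nonneg (by omega)
    -- A's loop reaches some pvFlat j with length ≥ k
    have hfuel : k ≤ ((pvFlat input (0 + (2 * input.length * k.toNat + 2))).length : Int) := by
      have hpre1 : pvFlat input (1 + 2 * input.length * k.toNat)
          <+: pvFlat input (0 + (2 * input.length * k.toNat + 2)) :=
        pvFlat_prefix input (by omega)
      have hlen1 : (pvFlat input (1 + 2 * input.length * k.toNat)).length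
          = (pvChunk input 0).length + k.toNat * (pvCycle input).length := by
        rw [pvFlat_cycle, List.length_append, pvRepLen]
      have hge : k.toNat ≤ (pvFlat input (1 + 2 * input.length * k.toNat)).length := by
        have := Nat.le_mul_of_pos_right k.toNat hLpos
        omega
      have := hpre1.length_le
      omega
    obtain ⟨jA, hAeq, hAlen⟩ :=
      pvLoop_reaches input k hN (2 * input.length * k.toNat + 2) 0 hfuel
    rw [show pvFlat input 0 = [] from rfl] at hAeq
    rw [hAeq]
    -- B's side
    have hsl : ∀ xs : List Int, PySem.List.slice xs none (some k) = xs.take k.toNat :=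
      fun xs => PySem.List.slice_to xs (by omega)
    simp only [hsl, if_neg hk, pvHead_eq input, pvFoldCycle input hN]
    have hfinal : ∀ b : Nat, k.toNat ≤ (pvFlat input b).length →
        (pvFlat input jA).take k.toNat = (pvFlat input b).take k.toNat := by
      intro b hb
      exact pvTake_common k.toNat
        (pvFlat_prefix input (le_max_left jA b))
        (pvFlat_prefix input (le_max_right jA b))
        (by omega) hb
    by_cases hsmall : k ≤ ((pvChunk input 0).length : Int)
    · rw [if_pos hsmall, ← pvFlat_one]
      exact hfinal 1 (by rw [pvFlat_one]; omega)
    · rw [if_neg hsmall]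
      set L : Int := ((pvCycle input).length : Int) with hL
      set x : Int := k - ((pvChunk input 0).length : Int) with hx
      have hLneg : -L < 0 := by omega
      have hdm := PySem.Int.floordiv_mul_add_mod x (-L)
      have hrb := PySem.Int.mod_neg_bounds x hLneg
      set q : Int := PySem.Int.floordiv x (-L) with hq
      have hrepsL : (-q) * L = x - PySem.Int.mod x (-L) := by
        have : q * (-L) = x - PySem.Int.mod x (-L) := by omega
        nlinarith [this]
      have hxpos : 0 < x := by omega
      have hreps_pos : 0 < -q := by nlinarith [hrepsL, hrb.1, hrb.2, hLpos]
      have hm : (((-q).toNat : Nat) : Int) = -q := Int.toNat_of_nonneg (by omega)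
      have hrep : PySem.List.pyRepeat (pvCycle input) (-q)
          = (List.replicate (-q).toNat (pvCycle input)).flatten := rfl
      rw [hrep, ← pvFlat_cycle input]
      apply hfinal
      have hlen2 : (pvFlat input (1 + 2 * input.length * (-q).toNat)).length
          = (pvChunk input 0).length + (-q).toNat * (pvCycle input).length := by
        rw [pvFlat_cycle, List.length_append, pvRepLen]
      have hcast : (((-q).toNat * (pvCycle input).length : Nat) : Int) = (-q) * L := by
        push_cast [hm]; ring
      have hxle : x ≤ (-q) * L := by omega
      omega
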